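-- pv_equiv track=rewrite | github.com/gitter-badger/BEE2.4 | src/utils.py | fit
-- ===== SOURCE A (Python) =====
-- import collections
--
-- def append_bothsides(deq):
--     """Alternately add to each side of a deque."""
--     while True:
--         deq.append((yield))
--         deq.appendleft((yield))
--
-- def fit(dist, obj):
--     """Figure out the smallest number of parts to stretch a distance."""
--     # If dist is a float the outputs will become floats as well
--     # so ensure it's an int.
--     dist = int(dist)
--     if dist <= 0:
--         return []
--     orig_dist = dist
--     smallest = obj[-1]
--     items = collections.deque()
--
--     # We use this so the small sections appear on both sides of the area.
--     adder = append_bothsides(items)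
--     next(adder)
--     while dist >= smallest:
--         for item in obj:
--             if item <= dist:
--                 adder.send(item)
--                 dist -= item
--                 break
--     if dist > 0:
--         adder.send(dist)
--
--     assert sum(items) == orig_dist
--     return list(items)  # Dump the deque
-- ===== SOURCE B (Python) =====
-- def fit(dist, obj):
--     """Figure out the smallest number of parts to stretch a distance."""
--     dist = int(dist)
--     if dist <= 0:
--         return []
--     smallest = obj[-1]
--     # Greedy picks, batched: while the first usable item stays the same,
--     # take all its repeats at once with one integer division.
--     picks = []
--     i = 0
--     while dist >= smallest:
--         while obj[i] > dist:      # items skipped here stay too big while dist shrinks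
--             i += 1
--         v = obj[i]
--         k = (dist - max(v, smallest)) // v + 1
--         picks.extend([v] * k)
--         dist -= k * v
--     if dist > 0:
--         picks.append(dist)
--     # Deal the picks alternately: even-index picks go right (in order),
--     # odd-index picks go left (reversed).
--     right, left = [], []
--     i = 0
--     n = len(picks)
--     while i < n:
--         right.append(picks[i])
--         if i + 1 < n:
--             left.append(picks[i + 1])
--         i += 2
--     left.reverse()
--     return left + right
-- ===== Notes on version B (the rewrite author's own statement) =====
-- stated objective: alternative
-- what changed: Replaces A's one-pick-at-a-time loop (rescanning obj from the start for every pick and feeding a deque through an alternating generator) by batching all consecutive picks of the same item with one integer division over a forward-moving index, then dealing the picks into the alternating left/right placement by index parity; Pre_ excludes empty obj (A raises IndexError) and obj containing a non-positive item, where A's loop usually never terminates and B diverges.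
-- outside the precondition, e.g. on fit(3, [5, -1, 2]): A returns [-1, -1, 5], B does not finish within the time limit
import Mathlib
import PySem

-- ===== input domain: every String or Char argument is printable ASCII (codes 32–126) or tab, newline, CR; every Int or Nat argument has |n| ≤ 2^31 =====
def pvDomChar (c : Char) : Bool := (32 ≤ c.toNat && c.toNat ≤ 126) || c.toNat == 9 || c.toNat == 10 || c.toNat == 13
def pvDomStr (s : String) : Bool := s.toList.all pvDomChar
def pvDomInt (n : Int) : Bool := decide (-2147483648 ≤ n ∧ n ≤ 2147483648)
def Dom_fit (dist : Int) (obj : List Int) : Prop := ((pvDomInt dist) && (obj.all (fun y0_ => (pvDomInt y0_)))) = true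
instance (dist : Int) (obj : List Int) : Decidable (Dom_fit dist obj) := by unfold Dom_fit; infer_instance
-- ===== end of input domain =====

-- B batches equal consecutive greedy picks with one integer division and deals the picks
-- into the alternating placement by index parity, instead of A's one-pick-at-a-time
-- generator/deque loop (objective: alternative — no per-pick rescan, no generator).

-- ===== PORT A =====
-- adder.send(item): the append_bothsides generator alternates deque.append / deque.appendleft
def pySend (items : List Int) (flip : Bool) (v : Int) : List Int :=
  if flip then v :: items else items ++ [v]

-- 'for item in obj: if item <= dist: … break' — the first item ≤ dist (none: no break)
def findEligible (obj : List Int) (dist : Int) : Option Int :=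
  match obj with
  | [] => none
  | x :: xs => if x ≤ dist then some x else findEligible xs dist

-- 'while dist >= smallest: …'; fuel makes the loop total (dist.toNat alone suffices under
-- Pre_, where every pick is ≥ 1; the slack only widens agreement outside Pre_, where
-- Python's loop can run longer before terminating); the 'none' branch is Python's
-- infinite loop, unreachable under Pre_ (the last element of obj is always eligible).
def fitLoopA (fuel : Nat) (dist smallest : Int) (obj items : List Int) (flip : Bool) :
    Int × List Int × Bool :=
  match fuel with
  | 0 => (dist, items, flip)
  | f + 1 =>
    if smallest ≤ dist then
      match findEligible obj dist with
      | some v => fitLoopA f (dist - v) smallest obj (pySend items flip v) (!flip)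
      | none => (dist, items, flip)
    else (dist, items, flip)

def fit (dist : Int) (obj : List Int) : List Int :=
  if dist ≤ 0 then []
  else
    match PySem.List.pyGet? obj (-1) with     -- obj[-1]; none = IndexError, excluded by Pre_
    | none => []
    | some smallest =>
      let r := fitLoopA (dist.toNat + 65536) dist smallest obj [] false
      if 0 < r.1 then pySend r.2.1 r.2.2 r.1 else r.2.1

-- ===== PORT B =====
-- 'while obj[i] > dist: i += 1' on the remaining suffix ([] = IndexError, unreachable under Pre_)
def skipBig (l : List Int) (dist : Int) : List Int :=
  match l with
  | [] => []
  | x :: xs => if dist < x then skipBig xs dist else l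

-- B's batched loop over the suffix obj[i:]; under Pre_ (all items positive) fuel
-- obj.length + 1 suffices (the usable suffix strictly shrinks between iterations);
-- fuel running out is Source B's infinite loop, unreachable under Pre_.
def fitLoopB (fuel : Nat) (dist smallest : Int) (suffix picks : List Int) :
    Int × List Int :=
  match fuel with
  | 0 => (dist, picks)
  | f + 1 =>
    if smallest ≤ dist then
      match skipBig suffix dist with
      | [] => (dist, picks)
      | v :: rest =>
        let k : Int := PySem.Int.floordiv (dist - max v smallest) v + 1
        fitLoopB f (dist - k * v) smallest (v :: rest) (picks ++ List.replicate k.toNat v)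
    else (dist, picks)

-- the two-at-a-time dealing while loop: (right, left) before left.reverse()
def dealLoop (picks : List Int) : List Int × List Int :=
  match picks with
  | [] => ([], [])
  | [x] => ([x], [])
  | x :: y :: rest =>
    let p := dealLoop rest
    (x :: p.1, y :: p.2)

def fit_alt (dist : Int) (obj : List Int) : List Int :=
  if dist ≤ 0 then []
  else
    match PySem.List.pyGet? obj (-1) with
    | none => []
    | some smallest =>
      let r := fitLoopB (obj.length + 1) dist smallest obj []
      let picks := if 0 < r.1 then r.2 ++ [r.1] else r.2
      let p := dealLoop picks
      p.2.reverse ++ p.1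

-- ===== PRECONDITION & SPEC =====
-- For positive dist, Pre_ excludes empty obj (A raises IndexError on obj[-1]) and obj with a
-- non-positive entry: there A's while loop usually never terminates (and on the rare inputs
-- where it escapes, B's batching loop diverges), so that corner is not claimed here.
def Pre_fit (dist : Int) (obj : List Int) : Prop :=
  0 < dist → (obj ≠ [] ∧ ∀ x ∈ obj, 0 < x)
instance (dist : Int) (obj : List Int) : Decidable (Pre_fit dist obj) := by
  unfold Pre_fit; infer_instance

def pvWitness_fit : Int × List Int := (7, [3, 2, 1])

def Spec_fit (dist : Int) (obj : List Int) (out : List Int) : Prop := out = fit_alt dist obj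
instance (dist : Int) (obj : List Int) (out : List Int) : Decidable (Spec_fit dist obj out) := by
  unfold Spec_fit; infer_instance

-- ===== CLAIM (what is proved, stated in full; the proofs are below) =====
def Claim_equal_fit : Prop := ∀ (dist : Int) (obj : List Int), Dom_fit dist obj →
  Pre_fit dist obj → Spec_fit dist obj (fit dist obj)

-- ===== LEMMAS AND PROOFS =====

-- the alternating placement of a whole pick sequence, as a fold
def placeFold (st : List Int × Bool) (ps : List Int) : List Int × Bool :=
  ps.foldl (fun st p => (pySend st.1 st.2 p, !st.2)) st

theorem pyGet?_neg_one_eq_getLast? (l : List Int) :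
    PySem.List.pyGet? l (-1) = l.getLast? := by
  simp [PySem.List.pyGet?, PySem.List.pyIdx?]
  rcases l with _ | ⟨x, xs⟩
  · simp
  · simp [List.getLast?_eq_getElem?]

theorem findEligible_append (pre l : List Int) (dist : Int) (h : ∀ x ∈ pre, dist < x) :
    findEligible (pre ++ l) dist = findEligible l dist := by
  induction pre with
  | nil => simp
  | cons x xs ih =>
    have hx := h x (by simp)
    simp only [List.cons_append, findEligible, if_neg (not_le.mpr hx)]
    exact ih (fun y hy => h y (by simp [hy]))

theorem skipBig_decomp (l : List Int) (dist : Int) :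
    ∃ sk, l = sk ++ skipBig l dist ∧ ∀ x ∈ sk, dist < x := by
  induction l with
  | nil => exact ⟨[], by simp [skipBig]⟩
  | cons x xs ih =>
    by_cases hx : dist < x
    · obtain ⟨sk, h1, h2⟩ := ih
      refine ⟨x :: sk, by simp [skipBig, hx, ← h1], ?_⟩
      intro y hy
      rcases List.mem_cons.1 hy with h | h
      · omega
      · exact h2 y h
    · exact ⟨[], by simp [skipBig, hx]⟩

theorem skipBig_head (l : List Int) (dist : Int) (v : Int) (rest : List Int)
    (h : skipBig l dist = v :: rest) : v ≤ dist := by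
  induction l with
  | nil => simp [skipBig] at h
  | cons x xs ih =>
    by_cases hx : dist < x
    · simp only [skipBig, if_pos hx] at h; exact ih h
    · simp only [skipBig, if_neg hx] at h
      cases h; omega

theorem skipBig_ne_nil (l : List Int) (dist s : Int) (hl : l.getLast? = some s)
    (hs : s ≤ dist) : skipBig l dist ≠ [] := by
  induction l with
  | nil => simp at hl
  | cons x xs ih =>
    by_cases hx : dist < x
    · rcases xs with _ | ⟨y, ys⟩
      · simp at hl; omega
      · simp only [skipBig, if_pos hx]; exact ih (by simpa using hl)
    · simp [skipBig, hx]

theorem skipBig_length_le (l : List Int) (dist : Int) :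
    (skipBig l dist).length ≤ l.length := by
  induction l with
  | nil => simp [skipBig]
  | cons x xs ih =>
    by_cases hx : dist < x
    · simp only [skipBig, if_pos hx, List.length_cons]; omega
    · simp [skipBig, hx]

theorem fitLoopA_stop (fuel : Nat) (dist smallest : Int) (obj items : List Int) (flip : Bool)
    (h : dist < smallest) : fitLoopA fuel dist smallest obj items flip = (dist, items, flip) := by
  cases fuel with
  | zero => rfl
  | succ f => simp [fitLoopA, not_le.mpr h]

theorem fitLoopB_stop (fuel : Nat) (dist smallest : Int) (suffix picks : List Int)
    (h : dist < smallest) : fitLoopB fuel dist smallest suffix picks = (dist, picks) := by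
  cases fuel with
  | zero => rfl
  | succ f => simp [fitLoopB, not_le.mpr h]

-- a batch of j consecutive picks of the same item v in A's loop
theorem fitLoopA_batch (v smallest : Int) (pre rest : List Int) (hv : 0 < v) :
    ∀ (j fuel : Nat) (dist : Int) (items : List Int) (flip : Bool),
    j ≤ fuel →
    (∀ x ∈ pre, dist < x) →
    (∀ t : Nat, t < j → max v smallest ≤ dist - t * v) →
    fitLoopA fuel dist smallest (pre ++ v :: rest) items flip =
      fitLoopA (fuel - j) (dist - j * v) smallest (pre ++ v :: rest)
        (placeFold (items, flip) (List.replicate j v)).1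
        (placeFold (items, flip) (List.replicate j v)).2 := by
  intro j
  induction j with
  | zero => intro fuel dist items flip _ _ _; simp [placeFold]
  | succ j ih =>
    intro fuel dist items flip hj hpre hpicks
    have h0 : max v smallest ≤ dist - 0 * v := hpicks 0 (by omega)
    simp only [zero_mul, sub_zero] at h0
    obtain ⟨f, rfl⟩ : ∃ f, fuel = f + 1 := ⟨fuel - 1, by omega⟩
    have hguard : smallest ≤ dist := le_trans (le_max_right _ _) h0
    have hvd : v ≤ dist := le_trans (le_max_left _ _) h0
    have helig : findEligible (pre ++ v :: rest) dist = some v := by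
      rw [findEligible_append _ _ _ hpre]
      simp [findEligible, hvd]
    rw [show (fitLoopA (f + 1) dist smallest (pre ++ v :: rest) items flip =
        fitLoopA f (dist - v) smallest (pre ++ v :: rest) (pySend items flip v) (!flip)) from by
      simp [fitLoopA, hguard, helig]]
    have step := ih f (dist - v) (pySend items flip v) (!flip) (by omega)
      (fun x hx => lt_of_le_of_lt (by omega) (hpre x hx))
      (fun t ht => by
        have h1 : max v smallest ≤ dist - (t + 1 : Nat) * v := hpicks (t + 1) (by omega)
        push_cast at h1 ⊢
        nlinarith)
    rw [step]
    have hrep : (List.replicate (j + 1) v) = v :: List.replicate j v := rfl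
    have hpf : placeFold (items, flip) (v :: List.replicate j v)
        = placeFold (pySend items flip v, !flip) (List.replicate j v) := rfl
    have hd : dist - v - j * v = dist - (j + 1 : Nat) * v := by push_cast; ring
    rw [hrep, hpf, hd, show f + 1 - (j + 1) = f - j from by omega]

-- the two loops compute the same final distance and pick sequence (A's placed as it goes)
theorem loops_agree (smallest : Int) (obj : List Int)
    (hpos : ∀ x ∈ obj, 0 < x) :
    ∀ (fuelB : Nat) (suffix pre : List Int) (dist : Int) (fuelA : Nat)
      (items : List Int) (flip : Bool) (picks : List Int),
    obj = pre ++ suffix →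
    (∀ x ∈ pre, dist < x) →
    dist.toNat ≤ fuelA →
    suffix.getLast? = some smallest →
    (smallest ≤ dist → (skipBig suffix dist).length ≤ fuelB) →
    ∃ d ps,
      fitLoopA fuelA dist smallest obj items flip = (d, placeFold (items, flip) ps) ∧
      fitLoopB fuelB dist smallest suffix picks = (d, picks ++ ps) := by
  intro fuelB
  induction fuelB with
  | zero =>
    intro suffix pre dist fuelA items flip picks hobj hpre hfA hlastS hfB
    by_cases hd : smallest ≤ dist
    · exfalso
      have hne := skipBig_ne_nil suffix dist smallest hlastS hd
      have hlen := hfB hd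
      exact hne (List.length_eq_zero_iff.mp (by omega))
    · push_neg at hd
      exact ⟨dist, [], by simp [placeFold, fitLoopA_stop _ _ _ _ _ _ hd],
        by simp [fitLoopB_stop _ _ _ _ _ hd]⟩
  | succ fB ih =>
    intro suffix pre dist fuelA items flip picks hobj hpre hfA hlastS hfB
    by_cases hd : smallest ≤ dist
    case neg =>
      push_neg at hd
      exact ⟨dist, [], by simp [placeFold, fitLoopA_stop _ _ _ _ _ _ hd],
        by simp [fitLoopB_stop _ _ _ _ _ hd]⟩
    case pos =>
    obtain ⟨v, rest, hsk⟩ : ∃ v rest, skipBig suffix dist = v :: rest := by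
      rcases h : skipBig suffix dist with _ | ⟨v, rest⟩
      · exact absurd h (skipBig_ne_nil suffix dist smallest hlastS hd)
      · exact ⟨v, rest, rfl⟩
    obtain ⟨sk, hdecomp, hskgt⟩ := skipBig_decomp suffix dist
    rw [hsk] at hdecomp
    have hvle : v ≤ dist := skipBig_head suffix dist v rest hsk
    have hvpos : 0 < v := hpos v (by rw [hobj, hdecomp]; simp)
    have hM : max v smallest ≤ dist := max_le hvle hd
    have hMpos : 1 ≤ max v smallest := le_trans hvpos (le_max_left _ _)
    set M := max v smallest with hMdef
    set k : Int := PySem.Int.floordiv (dist - M) v + 1 with hkdef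
    have hfd : PySem.Int.floordiv (dist - M) v = (dist - M) / v :=
      PySem.Int.floordiv_eq_ediv_of_pos hvpos
    have hq0 : 0 ≤ (dist - M) / v := Int.ediv_nonneg (by omega) (by omega)
    have hk1 : 1 ≤ k := by rw [hkdef, hfd]; omega
    have hlb : (k - 1) * v ≤ dist - M := by
      rw [hkdef, hfd]; simpa using Int.ediv_mul_le (dist - M) (by omega : v ≠ 0)
    have hub : dist - k * v < M := by
      have := Int.lt_ediv_add_one_mul_self (dist - M) hvpos
      rw [hkdef, hfd]; omega
    set j : Nat := k.toNat with hjdef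
    have hjk : (j : Int) = k := Int.toNat_of_nonneg (by omega)
    have hkdist : k ≤ dist := by nlinarith
    have hjfA : j ≤ fuelA := by omega
    have hprebig : ∀ x ∈ pre ++ sk, dist < x := by
      intro x hx
      rcases List.mem_append.1 hx with h | h
      · exact hpre x h
      · exact hskgt x h
    have hobj2 : obj = (pre ++ sk) ++ v :: rest := by rw [hobj, hdecomp, List.append_assoc]
    have hbatchcond : ∀ t : Nat, t < j → M ≤ dist - t * v := by
      intro t ht
      have h1 : (t : Int) ≤ k - 1 := by omega
      have h2 : (t : Int) * v ≤ (k - 1) * v := mul_le_mul_of_nonneg_right h1 (by omega)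
      omega
    have hbatch := fitLoopA_batch v smallest (pre ++ sk) rest hvpos j fuelA dist items flip
      hjfA hprebig hbatchcond
    have hdist' : dist - k * v < dist := by nlinarith
    have hBstep : fitLoopB (fB + 1) dist smallest suffix picks =
        fitLoopB fB (dist - k * v) smallest (v :: rest) (picks ++ List.replicate j v) := by
      rw [show fitLoopB (fB + 1) dist smallest suffix picks =
          (if smallest ≤ dist then
            match skipBig suffix dist with
            | [] => (dist, picks)
            | v :: rest =>
              fitLoopB fB (dist - (PySem.Int.floordiv (dist - max v smallest) v + 1) * v) smallest
                (v :: rest) (picks ++ List.replicate (PySem.Int.floordiv (dist - max v smallest) v + 1).toNat v)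
          else (dist, picks)) from rfl]
      rw [if_pos hd, hsk]
    have hlast' : (v :: rest).getLast? = some smallest := by
      rw [hdecomp, List.getLast?_append_cons] at hlastS
      exact hlastS
    have hkv_ge_k : k ≤ k * v := le_mul_of_one_le_right (by omega) (by omega)
    obtain ⟨d, ps, hA, hB⟩ := ih (v :: rest) (pre ++ sk) (dist - k * v) (fuelA - j)
      (placeFold (items, flip) (List.replicate j v)).1
      (placeFold (items, flip) (List.replicate j v)).2
      (picks ++ List.replicate j v)
      hobj2
      (fun x hx => lt_trans hdist' (hprebig x hx))
      (by omega)
      hlast'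
      (by
        intro hd'
        have hdv : dist - k * v < v := by
          rcases max_cases v smallest with ⟨he, _⟩ | ⟨he, hlt⟩
          · omega
          · omega
        have hskip2 : skipBig (v :: rest) (dist - k * v) = skipBig rest (dist - k * v) := by
          simp [skipBig, hdv]
        rw [hskip2]
        have h1 := skipBig_length_le rest (dist - k * v)
        have h2 := hfB hd
        rw [hsk] at h2
        simp at h2
        omega)
    refine ⟨d, List.replicate j v ++ ps, ?_, ?_⟩
    · rw [hobj2, hbatch, ← hobj2]
      rw [show (dist - (j : Int) * v) = dist - k * v from by rw [hjk]]
      rw [hA]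
      congr 1
      simp only [placeFold, List.foldl_append]
    · rw [hBstep, hB, List.append_assoc]

theorem dealLoop_cons : ∀ (ps : List Int) (p : Int),
    dealLoop (p :: ps) = (p :: (dealLoop ps).2, (dealLoop ps).1)
  | [], p => by simp [dealLoop]
  | [x], p => by simp [dealLoop]
  | x :: y :: rest, p => by
    have ih := dealLoop_cons rest y
    simp [dealLoop, ih]

-- A's alternating placement equals B's parity dealing: left picks reversed, then right picks
theorem place_deal (ps : List Int) : ∀ acc : List Int,
    (placeFold (acc, false) ps).1 = (dealLoop ps).2.reverse ++ acc ++ (dealLoop ps).1 ∧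
    (placeFold (acc, true) ps).1 = (dealLoop ps).1.reverse ++ acc ++ (dealLoop ps).2 := by
  induction ps with
  | nil => intro acc; simp [placeFold, dealLoop]
  | cons p ps ih =>
    intro acc
    rw [dealLoop_cons]
    constructor
    · have h2 := (ih (acc ++ [p])).2
      simpa [placeFold, pySend, List.append_assoc] using h2
    · have h1 := (ih (p :: acc)).1
      simpa [placeFold, pySend, List.append_assoc] using h1

-- ===== VERDICT (by name: the statement is the Claim_ definition above) =====
theorem fit_spec : Claim_equal_fit := by
  intro dist obj _hdom hpre
  unfold Spec_fit fit fit_alt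
  by_cases h0 : dist ≤ 0
  · rw [if_pos h0, if_pos h0]
  · rw [if_neg h0, if_neg h0]
    obtain ⟨hne, hpos⟩ := hpre (by omega)
    obtain ⟨smallest, hlast⟩ : ∃ s, obj.getLast? = some s :=
      Option.isSome_iff_exists.mp (List.getLast?_isSome.mpr hne)
    have hget : PySem.List.pyGet? obj (-1) = some smallest := by
      rw [pyGet?_neg_one_eq_getLast?, hlast]
    rw [hget]
    obtain ⟨d, ps, hA, hB⟩ := loops_agree smallest obj hpos (obj.length + 1) obj [] dist
      (dist.toNat + 65536) [] false [] (by simp) (by simp) (by omega) hlast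
      (fun _ => by have h1 := skipBig_length_le obj dist; omega)
    simp only [hA, hB, List.nil_append]
    by_cases hdpos : 0 < d
    · rw [if_pos hdpos, if_pos hdpos]
      have hstep : pySend (placeFold ([], false) ps).1 (placeFold ([], false) ps).2 d
          = (placeFold ([], false) (ps ++ [d])).1 := by
        simp [placeFold, List.foldl_append]
      rw [hstep, (place_deal (ps ++ [d]) []).1]
      simp
    · rw [if_neg hdpos, if_neg hdpos]
      rw [(place_deal ps []).1]
      simp
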